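-- pv_equiv track=rewrite | github.com/uio-bmi/immuneML | immuneML/ml_methods/classifiers/BinaryFeatureClassifier.py | _test_is_improvement
-- ===== SOURCE A (Python) =====
-- def _test_is_improvement(scores, min_delta):
--     if len(scores) == 0:
--         return []
--
--     best = scores[0]
--     is_improvement = [True]
--
--     for score in scores[1:]:
--         if score > best + min_delta:
--             best = score
--             is_improvement.append(True)
--         else:
--             is_improvement.append(False)
--
--     return is_improvement
-- ===== SOURCE B (Python) =====
-- def _test_is_improvement(scores, min_delta):
--     if not scores:
--         return []
--     # pass 1: prefix table of the running accepted best
--     best_list = [scores[0]]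
--     for s in scores[1:]:
--         b = best_list[-1]
--         best_list.append(s if s > b + min_delta else b)
--     # pass 2: each score is an improvement iff it beats the best before it
--     return [True] + [s > b + min_delta for s, b in zip(scores[1:], best_list)]
-- ===== Notes on version B (the rewrite author's own statement) =====
-- stated objective: alternative
-- what changed: Replaces the single interleaved loop (running best + flag list in one state) by a scan pass building a prefix table of accepted-best values followed by a separate zip/comprehension pass deriving the flags.
import Mathlib
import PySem

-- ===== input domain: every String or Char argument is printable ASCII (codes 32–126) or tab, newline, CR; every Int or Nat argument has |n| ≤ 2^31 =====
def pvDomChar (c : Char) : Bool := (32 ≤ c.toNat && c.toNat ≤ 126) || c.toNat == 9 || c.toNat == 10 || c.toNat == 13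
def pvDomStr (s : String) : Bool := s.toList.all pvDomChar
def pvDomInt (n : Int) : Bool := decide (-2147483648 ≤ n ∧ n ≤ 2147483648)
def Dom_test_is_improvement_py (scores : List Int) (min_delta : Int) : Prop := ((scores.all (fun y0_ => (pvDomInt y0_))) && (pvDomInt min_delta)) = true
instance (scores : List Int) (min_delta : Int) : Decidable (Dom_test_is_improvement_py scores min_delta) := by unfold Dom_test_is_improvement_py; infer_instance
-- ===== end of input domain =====

-- B replaces A's single interleaved loop by a two-pass decomposition (prefix scan of accepted bests, then a zip/map deriving the flags); objective: alternative structure, same cost.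


-- ===== PORT A =====
-- Literal port of A: one loop over scores[1:] carrying (best, flag list).
def test_is_improvement_py (scores : List Int) (min_delta : Int) : List Bool :=
  match scores with
  | [] => []
  | s0 :: rest =>
    (rest.foldl (fun (st : Int × List Bool) score =>
      if score > st.1 + min_delta then (score, st.2 ++ [true])
      else (st.1, st.2 ++ [false])) (s0, [true])).2

-- ===== PORT B =====
-- Port of B: scan pass building the prefix table of accepted bests, then a zip/map pass.
def test_is_improvement_py_alt (scores : List Int) (min_delta : Int) : List Bool :=
  match scores with
  | [] => []
  | s0 :: rest =>
    let best_list := rest.foldl (fun bl s =>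
      let b := bl.getLast!
      bl ++ [if s > b + min_delta then s else b]) [s0]
    [true] ++ ((rest.zip best_list).map (fun sb => decide (sb.1 > sb.2 + min_delta)))

-- ===== PRECONDITION & SPEC =====
def Spec_test_is_improvement_py (scores : List Int) (min_delta : Int) (out : List Bool) : Prop := out = test_is_improvement_py_alt scores min_delta
instance (scores : List Int) (min_delta : Int) (out : List Bool) : Decidable (Spec_test_is_improvement_py scores min_delta out) := by unfold Spec_test_is_improvement_py; infer_instance

-- ===== CLAIM (what is proved, stated in full; the proofs are below) =====
def Claim_equal_test_is_improvement_py : Prop := ∀ (scores : List Int) (min_delta : Int), Dom_test_is_improvement_py scores min_delta → Spec_test_is_improvement_py scores min_delta (test_is_improvement_py scores min_delta)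

-- ===== LEMMAS AND PROOFS =====

-- the common flag stream: flag for each score against the running accepted best
def pvFlags (md : Int) : Int → List Int → List Bool
  | _, [] => []
  | best, s :: r =>
    if s > best + md then true :: pvFlags md s r else false :: pvFlags md best r

-- the accepted-best value after each score of r, starting from best
def pvScan (md : Int) : Int → List Int → List Int
  | _, [] => []
  | best, s :: r =>
    let b' := if s > best + md then s else best
    b' :: pvScan md b' r

theorem pvGetLast_concat (l : List Int) (a : Int) : (l ++ [a]).getLast! = a := by
  induction l with
  | nil => rfl
  | cons x xs ih =>
    cases xs with
    | nil => simp [List.getLast!, List.getLast]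
    | cons y ys => simp_all [List.getLast!, List.getLast]

theorem pvA_foldl (md : Int) (r : List Int) : ∀ (best : Int) (acc : List Bool),
    (r.foldl (fun (st : Int × List Bool) score =>
      if score > st.1 + md then (score, st.2 ++ [true])
      else (st.1, st.2 ++ [false])) (best, acc)).2 = acc ++ pvFlags md best r := by
  induction r with
  | nil => intro best acc; simp [pvFlags]
  | cons s r ih =>
    intro best acc
    by_cases h : s > best + md
    · simp [List.foldl, h, ih, pvFlags]
    · simp [List.foldl, h, ih, pvFlags]

theorem pvB_foldl (md : Int) (r : List Int) : ∀ (bl : List Int) (best : Int),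
    bl ≠ [] → bl.getLast! = best →
    r.foldl (fun bl s =>
      let b := bl.getLast!
      bl ++ [if s > b + md then s else b]) bl = bl ++ pvScan md best r := by
  induction r with
  | nil => intro bl best _ _; simp [pvScan]
  | cons s r ih =>
    intro bl best hne hlast
    have h1 : (bl ++ [if s > best + md then s else best]) ≠ [] := by simp
    have h2 : (bl ++ [if s > best + md then s else best]).getLast! =
        (if s > best + md then s else best) := pvGetLast_concat _ _
    simp only [List.foldl, hlast]
    rw [ih _ _ h1 h2]
    simp [pvScan]

theorem pvZip_flags (md : Int) (r : List Int) : ∀ (best : Int),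
    ((r.zip (best :: pvScan md best r)).map
      (fun sb => decide (sb.1 > sb.2 + md))) = pvFlags md best r := by
  induction r with
  | nil => intro best; simp [pvFlags]
  | cons s r ih =>
    intro best
    by_cases h : s > best + md
    · have hih := ih s
      simp only [List.zip] at hih
      simp [pvScan, pvFlags, h, List.zip, hih]
    · have hih := ih best
      simp only [List.zip] at hih
      simp [pvScan, pvFlags, h, List.zip, hih]

-- ===== VERDICT (by name: the statement is the Claim_ definition above) =====
theorem test_is_improvement_py_spec : Claim_equal_test_is_improvement_py := by
  intro scores md _
  show test_is_improvement_py scores md = test_is_improvement_py_alt scores md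
  match scores with
  | [] => rfl
  | s0 :: rest =>
    simp only [test_is_improvement_py, test_is_improvement_py_alt]
    rw [pvA_foldl, pvB_foldl md rest [s0] s0 (by simp) rfl]
    simp [pvZip_flags]
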